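-- pv_equiv track=rewrite | github.com/slemerdy/LITO | LiveOSC.py | generate_strip_string
-- ===== SOURCE A (Python) =====
-- def generate_strip_string(display_string):
--
--     u""" Hack: Shamelessly stolen from the MainDisplayController of the Mackie Control.
--     Should share this in future in a 'Common' package!
--
--     returns a n char string for of the passed string, trying to remove not so important
--     letters (and signs first...)
--     """
--
--     NUM_CHARS_PER_DISPLAY_STRIP = 9
--     if not display_string:
--         return ' ' * NUM_CHARS_PER_DISPLAY_STRIP
--
--     if len(display_string) > NUM_CHARS_PER_DISPLAY_STRIP - 1:
--         for um in [' ', 'Y', 'y', 'I', 'i', 'O', 'o', 'U', 'u', 'E', 'e', 'A', 'a']: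
--             while len(display_string) > NUM_CHARS_PER_DISPLAY_STRIP - 1 and display_string.rfind(um, 1) != -1:
--                 um_pos = display_string.rfind(um, 1)
--                 display_string = display_string[:um_pos] + display_string[um_pos + 1:]
--
--     ret = display_string.lstrip()
--     if len(ret) > NUM_CHARS_PER_DISPLAY_STRIP:
--         ret = ret[len(ret)-NUM_CHARS_PER_DISPLAY_STRIP:]
--
--     return ret
-- ===== SOURCE B (Python) =====
-- def generate_strip_string(display_string):
--     """One reversal of the tail + one counted removal pass per priority char
--     (instead of repeated rfind + slicing); same return value as the original."""
--     if not display_string: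
--         return ' ' * 9
--
--     s = display_string
--     if len(s) > 8:
--         budget = len(s) - 8
--         head, rev = s[0], s[:0:-1]          # reversed tail; index 0 is never removed
--         for c in ' YyIiOoUuEeAa':
--             if budget == 0:
--                 break
--             kept = []
--             for ch in rev:
--                 if ch == c and budget > 0:
--                     budget -= 1
--                 else:
--                     kept.append(ch)
--             rev = kept
--         s = head + ''.join(reversed(rev))
--
--     ret = s.lstrip()
--     if len(ret) > 9:
--         ret = ret[len(ret) - 9:]
--     return ret
-- ===== Notes on version B (the rewrite author's own statement) =====
-- stated objective: alternative
-- what changed: A repeatedly calls rfind and rebuilds the string by slicing for every single deleted character; B reverses the tail once and makes a single counted left-to-right removal pass per priority character with a shared deletion budget, then joins once.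
import Mathlib
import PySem

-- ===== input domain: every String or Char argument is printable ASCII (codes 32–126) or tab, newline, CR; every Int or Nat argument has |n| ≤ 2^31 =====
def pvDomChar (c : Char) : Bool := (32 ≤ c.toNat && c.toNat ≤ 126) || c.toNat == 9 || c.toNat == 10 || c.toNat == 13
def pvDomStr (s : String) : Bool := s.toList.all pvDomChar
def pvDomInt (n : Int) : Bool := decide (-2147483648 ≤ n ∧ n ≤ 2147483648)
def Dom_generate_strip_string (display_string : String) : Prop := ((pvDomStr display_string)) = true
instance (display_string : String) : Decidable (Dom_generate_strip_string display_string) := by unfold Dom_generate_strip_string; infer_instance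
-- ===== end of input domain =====

-- B replaces A's repeated rfind-and-reslice deletion loop by one reversal of the tail plus a single counted
-- removal pass per priority character (objective: alternative algorithm, same cost); same return value.

-- ===== PORT A =====
-- helper lemmas cited by aWhile's decreasing_by (they must precede the port)

theorem pv_pfx_singleton (c : Char) (v : List Char) :
    ([c].isPrefixOf v = true) ↔ v[0]? = some c := by
  cases v with
  | nil => simp [List.isPrefixOf]
  | cons x xs =>
    show ((c == x && List.isPrefixOf [] xs) = true) ↔ _
    rw [Bool.and_eq_true, beq_iff_eq]
    simp [List.isPrefixOf, eq_comm]

theorem pv_go_cases (u : List Char) (c : Char) (j : Nat) :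
    (PySem.Chars.rfind.go u [c] j = -1 ∧ ∀ i ≤ j, u[i]? ≠ some c) ∨
    (∃ p : Nat, PySem.Chars.rfind.go u [c] j = (p : Int) ∧ p ≤ j ∧ u[p]? = some c ∧
      ∀ i, p < i → i ≤ j → u[i]? ≠ some c) := by
  induction j with
  | zero =>
    rw [PySem.Chars.rfind.go]
    by_cases h : [c].isPrefixOf u
    · right
      refine ⟨0, by simp [h], le_refl 0, ?_, by omega⟩
      · have := (pv_pfx_singleton c u).1 h
        simpa using this
    · left
      refine ⟨by simp [h], ?_⟩
      intro i hi
      interval_cases i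
      intro hc
      exact h ((pv_pfx_singleton c u).2 (by simpa using hc))
  | succ j ih =>
    have hstep : PySem.Chars.rfind.go u [c] (j+1) =
        if [c].isPrefixOf (u.drop (j+1)) then ((j : Int)+1) else PySem.Chars.rfind.go u [c] j := by
      rw [PySem.Chars.rfind.go]; push_cast; ring_nf
    by_cases h : [c].isPrefixOf (u.drop (j+1))
    · right
      have hget : u[j+1]? = some c := by
        have := (pv_pfx_singleton c (u.drop (j+1))).1 h
        simpa [List.getElem?_drop] using this
      exact ⟨j+1, by simp [hstep, h], le_refl _, hget, by omega⟩
    · have hnot : u[j+1]? ≠ some c := by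
        intro hc
        exact h ((pv_pfx_singleton c (u.drop (j+1))).2 (by simpa [List.getElem?_drop] using hc))
      rcases ih with ⟨he, hall⟩ | ⟨p, hp, hpj, hg, hmax⟩
      · left
        refine ⟨by simp [hstep, h, he], ?_⟩
        intro i hi
        rcases Nat.lt_or_ge i (j+1) with hi' | hi'
        · exact hall i (by omega)
        · have : i = j + 1 := by omega
          simpa [this] using hnot
      · right
        refine ⟨p, by simp [hstep, h, hp], by omega, hg, ?_⟩
        intro i h1 h2
        rcases Nat.lt_or_ge i (j+1) with hi' | hi'
        · exact hmax i h1 (by omega)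
        · have : i = j + 1 := by omega
          simpa [this] using hnot

theorem pv_rfind_cases (u : List Char) (c : Char) :
    (PySem.Chars.rfind u [c] = -1 ∧ c ∉ u) ∨
    (∃ p : Nat, PySem.Chars.rfind u [c] = (p : Int) ∧ p < u.length ∧ u[p]? = some c ∧
      ∀ i, p < i → u[i]? ≠ some c) := by
  have hover : ∀ i, u.length ≤ i → u[i]? ≠ some c := by
    intro i hi hc
    rw [List.getElem?_eq_none_iff.2 hi] at hc
    cases hc
  rcases pv_go_cases u c u.length with ⟨he, hall⟩ | ⟨p, hp, hpj, hg, hmax⟩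
  · left
    refine ⟨he, fun hmem => ?_⟩
    rcases List.mem_iff_getElem?.1 hmem with ⟨i, hi⟩
    rcases Nat.lt_or_ge i u.length with h | h
    · exact hall i (by omega) hi
    · exact hover i h hi
  · right
    have hplt : p < u.length := by
      by_contra hge
      exact hover p (by omega) hg
    refine ⟨p, hp, hplt, hg, fun i h1 => ?_⟩
    rcases Nat.lt_or_ge i u.length with h | h
    · exact hmax i h1 (by omega)
    · exact hover i h

theorem pv_rff_eq (c h : Char) (t : List Char) :
    PySem.Chars.rfindFrom (h :: t) [c] 1 none =
      if PySem.Chars.rfind t [c] = -1 then -1 else 1 + PySem.Chars.rfind t [c] := by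
  simp only [PySem.Chars.rfindFrom]
  norm_num

theorem pv_rfindFrom_cases (c h : Char) (t : List Char) :
    (PySem.Chars.rfindFrom (h :: t) [c] 1 none = -1 ∧ c ∉ t) ∨
    (∃ p : Nat, PySem.Chars.rfindFrom (h :: t) [c] 1 none = ((p : Int) + 1) ∧ p < t.length ∧
      t[p]? = some c ∧ ∀ i, p < i → t[i]? ≠ some c) := by
  rw [pv_rff_eq]
  rcases pv_rfind_cases t c with ⟨he, hm⟩ | ⟨p, hp, hlt, hg, hmax⟩
  · left; exact ⟨by simp [he], hm⟩
  · right
    exact ⟨p, by rw [hp]; rw [if_neg (by omega)]; ring, hlt, hg, hmax⟩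

-- cited by aWhile's decreasing_by: one deletion step shortens the string by one
theorem pv_aStep_len (c : Char) (s : List Char)
    (h8 : 8 < s.length) (hne : PySem.Chars.rfindFrom s [c] 1 none ≠ -1) :
    (PySem.List.slice s none (some (PySem.Chars.rfindFrom s [c] 1 none)) ++
      PySem.List.slice s (some (PySem.Chars.rfindFrom s [c] 1 none + 1)) none).length < s.length := by
  match s with
  | [] => simp at h8
  | h :: t =>
    rcases pv_rfindFrom_cases c h t with ⟨he, _⟩ | ⟨p, hp, hlt, _, _⟩
    · exact absurd he hne
    · rw [hp]
      rw [show ((p : Int) + 1 + 1) = (((p + 2 : Nat) : Int)) from by push_cast; ring,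
        show ((p : Int) + 1) = (((p + 1 : Nat) : Int)) from by push_cast; ring,
        PySem.List.slice_to_natCast, PySem.List.slice_from_natCast]
      simp only [List.length_append, List.length_take, List.length_drop, List.length_cons]
      omega

-- the inner while loop of A: delete the rightmost occurrence of c at index ≥ 1 while len > 8
def aWhile (c : Char) (s : List Char) : List Char :=
  if hc : 8 < s.length ∧ PySem.Chars.rfindFrom s [c] 1 none ≠ -1 then
    let um_pos := PySem.Chars.rfindFrom s [c] 1 none
    aWhile c (PySem.List.slice s none (some um_pos) ++ PySem.List.slice s (some (um_pos + 1)) none)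
  else s
termination_by s.length
decreasing_by exact pv_aStep_len c s hc.1 hc.2

def aChars : List Char := [' ', 'Y', 'y', 'I', 'i', 'O', 'o', 'U', 'u', 'E', 'e', 'A', 'a']

def generate_strip_string (display_string : String) : String :=
  let s := display_string.toList
  if s = [] then String.ofList (List.replicate 9 ' ')
  else
    let s2 := if 8 < s.length then aChars.foldl (fun acc um => aWhile um acc) s else s
    let ret := PySem.Chars.lstrip s2
    String.ofList (if 9 < ret.length then PySem.List.slice ret (some ((ret.length : Int) - 9)) none else ret)

-- ===== PORT B =====
-- one pass over the reversed tail: drop occurrences of c while the removal budget lasts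
def bPass (c : Char) : List Char → Nat → List Char × Nat
  | [], b => ([], b)
  | x :: xs, b =>
    if x = c ∧ 0 < b then bPass c xs (b - 1)
    else
      let r := bPass c xs b
      (x :: r.1, r.2)

def bChars : List Char := " YyIiOoUuEeAa".toList

def generate_strip_string_alt (display_string : String) : String :=
  match display_string.toList with
  | [] => String.ofList (List.replicate 9 ' ')
  | hd :: tl =>
    let s2 :=
      if 8 < tl.length + 1 then
        -- rev = s[1:][::-1]; the fold's 'if p.2 = 0 then p' is the Python 'break'
        let st := bChars.foldl (fun (p : List Char × Nat) c => if p.2 = 0 then p else bPass c p.1 p.2)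
          (tl.reverse, (tl.length + 1) - 8)
        hd :: st.1.reverse
      else hd :: tl
    let ret := PySem.Chars.lstrip s2
    String.ofList (if 9 < ret.length then PySem.List.slice ret (some ((ret.length : Int) - 9)) none else ret)

-- ===== PRECONDITION & SPEC =====
def Spec_generate_strip_string (display_string : String) (out : String) : Prop := out = generate_strip_string_alt display_string
instance (display_string : String) (out : String) : Decidable (Spec_generate_strip_string display_string out) := by unfold Spec_generate_strip_string; infer_instance

-- ===== CLAIM (what is proved, stated in full; the proofs are below) =====
def Claim_equal_generate_strip_string : Prop := ∀ (display_string : String), Dom_generate_strip_string display_string → Spec_generate_strip_string display_string (generate_strip_string display_string)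

-- ===== LEMMAS AND PROOFS =====

-- remove the first (up to) k occurrences of c, scanning left to right
def rfk (c : Char) : List Char → Nat → List Char
  | [], _ => []
  | x :: xs, k => if x = c ∧ 0 < k then rfk c xs (k - 1) else x :: rfk c xs k

theorem rfk_zero (c : Char) (u : List Char) : rfk c u 0 = u := by
  induction u with
  | nil => rfl
  | cons x xs ih => simp [rfk, ih]

theorem rfk_succ_erase (c : Char) (u : List Char) (k : Nat) :
    rfk c u (k + 1) = rfk c (u.erase c) k := by
  induction u generalizing k with
  | nil => rfl
  | cons x xs ih =>
    by_cases hx : x = c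
    · simp [rfk, hx, List.erase_cons_head]
    · have hbe : ¬(x == c) = true := by simp [hx]
      simp [rfk, hx, List.erase_cons_tail hbe, ih]

theorem rfk_min (c : Char) (u : List Char) (k : Nat) :
    rfk c u k = rfk c u (min k (u.count c)) := by
  induction u generalizing k with
  | nil => rfl
  | cons x xs ih =>
    by_cases hx : x = c
    · subst hx
      cases k with
      | zero => simp
      | succ k' =>
        simp only [rfk, List.count_cons_self, true_and]
        rw [if_pos (by omega : (0:Nat) < k' + 1), if_pos (by omega : (0:Nat) < min (k' + 1) (xs.count x + 1))]
        have : min (k' + 1) (xs.count x + 1) - 1 = min k' (xs.count x) := by omega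
        rw [this, Nat.add_sub_cancel, ih]
    · have : (x :: xs).count c = xs.count c := by simp [List.count_cons, hx]
      cases k with
      | zero => simp
      | succ k' =>
        simp only [rfk, this, hx, false_and, if_false]
        rw [ih (k' + 1)]

theorem rfk_length (c : Char) (u : List Char) (k : Nat) :
    (rfk c u k).length = u.length - min k (u.count c) := by
  induction u generalizing k with
  | nil => simp [rfk]
  | cons x xs ih =>
    by_cases hx : x = c
    · subst hx
      cases k with
      | zero => simp [rfk_zero]
      | succ k' =>
        simp only [rfk, List.count_cons_self, true_and]
        rw [if_pos (by omega : (0:Nat) < k' + 1), Nat.add_sub_cancel, ih]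
        have h1 : min k' (xs.count x) ≤ xs.length := le_trans (min_le_right _ _) (List.count_le_length)
        simp only [List.length_cons]
        omega
    · have hcnt : (x :: xs).count c = xs.count c := by simp [List.count_cons, hx]
      cases k with
      | zero => simp [rfk_zero]
      | succ k' =>
        simp only [rfk, hx, false_and, if_false, List.length_cons, hcnt, ih]
        have h1 : min (k' + 1) (xs.count c) ≤ xs.length := le_trans (min_le_right _ _) (List.count_le_length)
        omega

theorem bPass_spec (c : Char) (u : List Char) (b : Nat) :
    bPass c u b = (rfk c u b, b - min b (u.count c)) := by
  induction u generalizing b with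
  | nil => simp [bPass, rfk]
  | cons x xs ih =>
    by_cases hx : x = c ∧ 0 < b
    · obtain ⟨hx1, hx2⟩ := hx
      subst hx1
      simp only [bPass, rfk, true_and, ih, List.count_cons_self]
      rw [if_pos hx2, if_pos hx2]
      have : b - 1 - min (b - 1) (xs.count x) = b - min b (xs.count x + 1) := by omega
      simp [this]
    · have hcnt : (x :: xs).count c = if x = c then xs.count c + 1 else xs.count c := by
        simp [List.count_cons]; split_ifs <;> omega
      simp only [bPass, rfk, if_neg hx, ih]
      rw [hcnt]
      split_ifs with h
      · have hb : b = 0 := by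
          rcases Nat.eq_zero_or_pos b with h0 | h0
          · exact h0
          · exact absurd ⟨h, h0⟩ hx
        simp [hb]
      · rfl

-- deleting the rightmost occurrence = erasing the first occurrence in the reverse
theorem pv_erase_last (c : Char) (t : List Char) (p : Nat)
    (hp : p < t.length) (hg : t[p]? = some c) (hmax : ∀ i, p < i → t[i]? ≠ some c) :
    List.take p t ++ List.drop (p + 1) t = (t.reverse.erase c).reverse := by
  have hgp : t[p] = c := by
    have := List.getElem?_eq_getElem hp
    rw [this] at hg
    exact Option.some.inj hg
  have hsplit : t = List.take p t ++ c :: List.drop (p + 1) t := by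
    conv_lhs => rw [← List.take_append_drop p t]
    congr 1
    rw [← List.getElem_cons_drop hp, hgp]
  have hnot : c ∉ (List.drop (p + 1) t).reverse := by
    rw [List.mem_reverse]
    intro hmem
    rcases List.mem_iff_getElem?.1 hmem with ⟨j, hj⟩
    rw [List.getElem?_drop] at hj
    exact hmax (p + 1 + j) (by omega) hj
  conv_rhs => rw [hsplit]
  rw [List.reverse_append, List.reverse_cons, List.append_assoc,
    List.erase_append_right _ hnot]
  simp

-- characterisation of A's inner while loop
theorem pv_aWhile_eq (c h : Char) :
    ∀ (n : Nat) (t : List Char), t.length ≤ n →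
      aWhile c (h :: t) =
        h :: (rfk c t.reverse (min ((t.length + 1) - 8) (t.reverse.count c))).reverse := by
  intro n
  induction n with
  | zero =>
    intro t ht
    have : t = [] := List.eq_nil_of_length_eq_zero (by omega)
    subst this
    rw [aWhile, dif_neg (by simp)]
    simp [rfk_zero]
  | succ n ih =>
    intro t ht
    by_cases h8 : 8 < t.length + 1
    · rcases pv_rfindFrom_cases c h t with ⟨he, hm⟩ | ⟨p, hp, hlt, hg, hmax⟩
      · rw [aWhile, dif_neg (by simp only [List.length_cons]; tauto)]
        have hcnt : t.reverse.count c = 0 := by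
          rw [List.count_eq_zero]
          simpa using hm
        simp [hcnt, rfk_zero]
      · have hmem : c ∈ t := List.mem_iff_getElem?.2 ⟨p, hg⟩
        have hcond : 8 < (h :: t).length ∧ PySem.Chars.rfindFrom (h :: t) [c] 1 none ≠ -1 := by
          constructor
          · simpa using h8
          · rw [hp]; omega
        rw [aWhile, dif_pos hcond]
        have h1 : PySem.Chars.rfindFrom (h :: t) [c] 1 none = (((p + 1 : Nat) : Int)) := by
          rw [hp]; push_cast; ring
        have h2 : PySem.Chars.rfindFrom (h :: t) [c] 1 none + 1 = (((p + 2 : Nat) : Int)) := by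
          rw [hp]; push_cast; ring
        show aWhile c (PySem.List.slice (h :: t) none (some (PySem.Chars.rfindFrom (h :: t) [c] 1 none)) ++
          PySem.List.slice (h :: t) (some (PySem.Chars.rfindFrom (h :: t) [c] 1 none + 1)) none) = _
        rw [h2, h1]
        have harg : PySem.List.slice (h :: t) none (some (((p + 1 : Nat) : Int))) ++
            PySem.List.slice (h :: t) (some (((p + 2 : Nat) : Int))) none =
            h :: ((t.reverse.erase c).reverse) := by
          rw [PySem.List.slice_to_natCast, PySem.List.slice_from_natCast]
          have : List.take (p + 1) (h :: t) = h :: List.take p t := rfl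
          rw [this]
          have : List.drop (p + 2) (h :: t) = List.drop (p + 1) t := rfl
          rw [this]
          rw [← pv_erase_last c t p hlt hg hmax]
          simp
        rw [harg]
        have hlen' : ((t.reverse.erase c).reverse).length = t.length - 1 := by
          have : c ∈ t.reverse := List.mem_reverse.2 hmem
          simp [List.length_erase_of_mem this]
        rw [ih _ (by omega)]
        congr 2
        have hrr : ((t.reverse.erase c).reverse).reverse = t.reverse.erase c := by
          rw [List.reverse_reverse]
        rw [hrr, hlen']
        have hcnt1 : 1 ≤ t.reverse.count c := by
          have : c ∈ t.reverse := List.mem_reverse.2 hmem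
          exact List.count_pos_iff.2 this
        have hce : (t.reverse.erase c).count c = t.reverse.count c - 1 := by
          simpa using List.count_erase_self c t.reverse
        rw [hce]
        have hb : min ((t.length + 1) - 8) (t.reverse.count c) =
            min ((t.length - 1 + 1) - 8) (t.reverse.count c - 1) + 1 := by omega
        rw [hb, rfk_succ_erase]
    · rw [aWhile, dif_neg (by simp only [List.length_cons]; tauto)]
      have : (t.length + 1) - 8 = 0 := by omega
      simp [this, rfk_zero]

-- the character-by-character fold: A's string state vs B's (reversed tail, budget) state
theorem pv_fold_eq (chars : List Char) :
    ∀ (h : Char) (rev : List Char) (b : Nat), rev.length + 1 = b + 8 →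
      chars.foldl (fun acc um => aWhile um acc) (h :: rev.reverse) =
        h :: ((chars.foldl (fun (p : List Char × Nat) c => if p.2 = 0 then p else bPass c p.1 p.2)
          (rev, b)).1).reverse := by
  induction chars with
  | nil => intro h rev b hinv; simp
  | cons c cs ih =>
    intro h rev b hinv
    simp only [List.foldl_cons]
    have hW := pv_aWhile_eq c h (rev.reverse.length) rev.reverse (le_refl _)
    rw [hW]
    have hrr : rev.reverse.reverse = rev := List.reverse_reverse rev
    rw [hrr] at hW ⊢
    have hb : (rev.reverse.length + 1) - 8 = b := by
      simp only [List.length_reverse]; omega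
    rw [hb]
    by_cases hb0 : b = 0
    · subst hb0
      simp only [if_pos rfl]
      rw [show min 0 (rev.count c) = 0 from by omega, rfk_zero]
      exact ih h rev 0 hinv
    · rw [if_neg hb0, bPass_spec]
      have hmin : rfk c rev b = rfk c rev (min b (rev.count c)) := rfk_min c rev b
      rw [← hmin]
      have hlen : (rfk c rev b).length = rev.length - min b (rev.count c) := rfk_length c rev b
      have hcle : min b (rev.count c) ≤ b := min_le_left _ _
      have hcle2 : min b (rev.count c) ≤ rev.length :=
        le_trans (min_le_right _ _) List.count_le_length
      have := ih h (rfk c rev b) (b - min b (rev.count c)) (by rw [hlen]; omega)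
      rw [rfk_min c rev b]
      rw [rfk_min c rev b] at this
      exact this

theorem pv_aChars_eq : aChars = bChars := by decide

-- ===== VERDICT (by name: the statement is the Claim_ definition above) =====
theorem generate_strip_string_spec : Claim_equal_generate_strip_string := by
  intro ds _
  unfold Spec_generate_strip_string generate_strip_string generate_strip_string_alt
  cases hds : ds.toList with
  | nil => simp
  | cons hd tl =>
    simp only [List.length_cons, reduceCtorEq, if_false]
    by_cases h8 : 8 < tl.length + 1
    · rw [if_pos h8, if_pos h8]
      have hfold := pv_fold_eq bChars hd tl.reverse ((tl.length + 1) - 8)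
        (by simp; omega)
      rw [List.reverse_reverse] at hfold
      rw [pv_aChars_eq, hfold]
    · rw [if_neg h8, if_neg h8]
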